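-- pv_equiv track=rewrite | github.com/Davidrbr95/TubuleMAP | tubulemap/cellpose_tracker/mesehwithlid.py | _split_segments_by_none
-- ===== SOURCE A (Python) =====
-- def _split_segments_by_none(rings3d):
--     """
--     Split rings3d (which may include None) into contiguous non-None segments.
--     Returns a list where each item is one segment (list of rings).
--     """
--     segments = []
--     current = []
--     for r in rings3d:
--         if r is None:
--             if len(current) > 0:
--                 segments.append(current)
--                 current = []
--         else:
--             current.append(r)
--     if len(current) > 0:
--         segments.append(current)
--     return segments
-- ===== SOURCE B (Python) =====
-- def _split_segments_by_none(rings3d):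
--     """
--     Split rings3d (which may include None) into contiguous non-None segments.
--     Run-scanning reimplementation: locate each maximal non-None run by index
--     and slice it out, instead of accumulating elements one by one.
--     """
--     n = len(rings3d)
--     segments = []
--     i = 0
--     while i < n:
--         if rings3d[i] is None:
--             i += 1
--         else:
--             j = i + 1
--             while j < n and rings3d[j] is not None:
--                 j += 1
--             segments.append(rings3d[i:j])
--             i = j
--     return segments
-- ===== Notes on version B (the rewrite author's own statement) =====
-- stated objective: alternative
-- what changed: Replaces A's element-by-element accumulator state machine with index-based two-pointer scanning: each maximal non-None run is located by an inner scan and sliced out whole.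
import Mathlib
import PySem

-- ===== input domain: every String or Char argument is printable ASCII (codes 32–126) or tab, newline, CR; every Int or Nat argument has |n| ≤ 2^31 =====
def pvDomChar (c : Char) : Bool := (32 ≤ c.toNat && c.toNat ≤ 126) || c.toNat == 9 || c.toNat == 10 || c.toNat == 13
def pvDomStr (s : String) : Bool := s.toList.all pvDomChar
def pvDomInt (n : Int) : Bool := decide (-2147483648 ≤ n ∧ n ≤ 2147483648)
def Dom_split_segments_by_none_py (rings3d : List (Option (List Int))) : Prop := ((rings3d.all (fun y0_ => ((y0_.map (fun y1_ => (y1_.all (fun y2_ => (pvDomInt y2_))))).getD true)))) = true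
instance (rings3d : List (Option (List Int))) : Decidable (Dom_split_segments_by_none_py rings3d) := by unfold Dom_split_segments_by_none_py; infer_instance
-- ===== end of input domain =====

-- B replaces A's element-by-element accumulator state machine by index-based
-- two-pointer scanning of maximal non-None runs, slicing each run out whole
-- (alternative algorithm of the same cost).

-- ===== PORT A =====
-- A: foldl over the list with state (segments, current), finalized after the loop.
def split_segments_by_none_py (rings3d : List (Option (List Int))) : List (List (List Int)) :=
  let st := rings3d.foldl
    (fun (st : List (List (List Int)) × List (List Int)) r =>
      match r with
      | none => if 0 < st.2.length then (st.1 ++ [st.2], []) else st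
      | some rr => (st.1, st.2 ++ [rr]))
    ([], [])
  if 0 < st.2.length then st.1 ++ [st.2] else st.1

-- ===== PORT B =====
-- inner while loop: advance j while j < n and rings3d[j] is not None
def pvScanRun (xs : List (Option (List Int))) (n j : Nat) : Nat :=
  if j < n && (xs.getD j none).isSome then pvScanRun xs n (j + 1) else j
termination_by n - j
decreasing_by simp_all; omega

-- used by pvSplitGo's termination: the inner loop never moves j backwards
theorem pvScanRun_ge (xs : List (Option (List Int))) (n j : Nat) : j ≤ pvScanRun xs n j := by
  unfold pvScanRun
  split
  · exact le_trans (Nat.le_succ j) (pvScanRun_ge xs n (j + 1))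
  · exact le_refl j
termination_by n - j
decreasing_by simp_all; omega

-- outer while loop over index i
def pvSplitGo (xs : List (Option (List Int))) (n i : Nat) : List (List (List Int)) :=
  if i < n then
    if (xs.getD i none).isSome = false then pvSplitGo xs n (i + 1)   -- rings3d[i] is None
    else
      -- rings3d[i:j] with j = the inner scan's stop index and 0 ≤ i ≤ j: exactly
      -- (drop i).take (j-i); the run holds no None, so stripping the Option
      -- wrapper (reduceOption) is exact here
      ((xs.drop i).take (pvScanRun xs n (i + 1) - i)).reduceOption ::
        pvSplitGo xs n (pvScanRun xs n (i + 1))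
  else []
termination_by n - i
decreasing_by
  · simp_all; omega
  · have := pvScanRun_ge xs n (i + 1); simp_all; omega

def split_segments_by_none_py_alt (rings3d : List (Option (List Int))) : List (List (List Int)) :=
  pvSplitGo rings3d rings3d.length 0

-- ===== PRECONDITION & SPEC =====
def Spec_split_segments_by_none_py (rings3d : List (Option (List Int))) (out : List (List (List Int))) : Prop := out = split_segments_by_none_py_alt rings3d
instance (rings3d : List (Option (List Int))) (out : List (List (List Int))) : Decidable (Spec_split_segments_by_none_py rings3d out) := by unfold Spec_split_segments_by_none_py; infer_instance

-- ===== CLAIM (what is proved, stated in full; the proofs are below) =====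
def Claim_equal_split_segments_by_none_py : Prop := ∀ (rings3d : List (Option (List Int))), Dom_split_segments_by_none_py rings3d → Spec_split_segments_by_none_py rings3d (split_segments_by_none_py rings3d)

-- ===== LEMMAS AND PROOFS =====

-- common characterization: g cur xs = the segments of xs with 'cur' the open segment
def pvG (cur : List (List Int)) : List (Option (List Int)) → List (List (List Int))
  | [] => if cur = [] then [] else [cur]
  | none :: xs => (if cur = [] then [] else [cur]) ++ pvG [] xs
  | some r :: xs => pvG (cur ++ [r]) xs

-- A's loop computes segs ++ pvG cur xs
theorem pvFoldA (xs : List (Option (List Int))) :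
    ∀ (segs : List (List (List Int))) (cur : List (List Int)),
      (let st := xs.foldl
        (fun (st : List (List (List Int)) × List (List Int)) r =>
          match r with
          | none => if 0 < st.2.length then (st.1 ++ [st.2], []) else st
          | some rr => (st.1, st.2 ++ [rr]))
        (segs, cur)
       if 0 < st.2.length then st.1 ++ [st.2] else st.1) = segs ++ pvG cur xs := by
  induction xs with
  | nil =>
    intro segs cur
    by_cases h : cur = [] <;> simp [pvG, h]
  | cons x xs ih =>
    intro segs cur
    match x with
    | none =>
      by_cases h : cur = []
      · simpa [pvG, h, List.foldl_cons] using ih segs []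
      · have hl : 0 < cur.length := List.length_pos_iff.mpr h
        simpa [pvG, h, hl, List.foldl_cons, List.append_assoc] using ih (segs ++ [cur]) []
    | some r =>
      simpa [pvG, List.foldl_cons] using ih segs (cur ++ [r])

-- stepping pvG through a run of non-None elements appends the run to the open segment
theorem pvG_run (run : List (Option (List Int))) :
    ∀ (cur : List (List Int)) (rest : List (Option (List Int))),
      run.all Option.isSome → pvG cur (run ++ rest) = pvG (cur ++ run.reduceOption) rest := by
  induction run with
  | nil => intro cur rest _; simp
  | cons x run ih =>
    intro cur rest hall
    match x with
    | none => simp at hall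
    | some r =>
      simp only [List.all_cons, Bool.and_eq_true] at hall
      simp only [List.cons_append, pvG, List.reduceOption_cons_of_some]
      rw [ih (cur ++ [r]) rest hall.2]
      simp [List.append_assoc]

-- the inner scan stops exactly at the end of the maximal non-None run
theorem pvScanRun_eq (xs : List (Option (List Int))) (j : Nat) :
    pvScanRun xs xs.length j = j + ((xs.drop j).takeWhile Option.isSome).length := by
  unfold pvScanRun
  by_cases hj : j < xs.length
  · have hdrop : xs.drop j = xs[j] :: xs.drop (j + 1) := List.drop_eq_getElem_cons hj
    have hget : xs[j]? = some xs[j] := List.getElem?_eq_getElem hj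
    by_cases hs : (xs[j] : Option (List Int)).isSome
    · rw [if_pos (by simp [List.getD, hj, hs])]
      rw [pvScanRun_eq xs (j + 1)]
      rw [hdrop, List.takeWhile_cons_of_pos hs]
      simp; omega
    · rw [if_neg (by simp [List.getD, hget]; intro _; simp_all)]
      rw [hdrop, List.takeWhile_cons_of_neg (by simp_all)]
      simp
  · rw [if_neg (by simp [hj])]
    rw [List.drop_eq_nil_of_le (by omega)]
    simp
termination_by xs.length - j
decreasing_by simp_all; omega

-- B's outer loop computes pvG [] of the remaining suffix
theorem pvGoEq (xs : List (Option (List Int))) (i : Nat) :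
    pvSplitGo xs xs.length i = pvG [] (xs.drop i) := by
  unfold pvSplitGo
  by_cases hi : i < xs.length
  · have hdrop : xs.drop i = xs[i] :: xs.drop (i + 1) := List.drop_eq_getElem_cons hi
    have hget : xs[i]? = some xs[i] := List.getElem?_eq_getElem hi
    rw [if_pos hi]
    by_cases hs : (xs[i] : Option (List Int)).isSome
    · rw [if_neg (by simp [List.getD, hget, hs])]
      obtain ⟨v, hv⟩ := Option.isSome_iff_exists.mp hs
      have hscan := pvScanRun_eq xs (i + 1)
      set tw := (xs.drop (i + 1)).takeWhile Option.isSome with htw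
      set dw := (xs.drop (i + 1)).dropWhile Option.isSome with hdw
      have hsplit : xs.drop (i + 1) = tw ++ dw := (List.takeWhile_append_dropWhile).symm
      have hslice : (xs.drop i).take (pvScanRun xs xs.length (i + 1) - i) = some v :: tw := by
        rw [hdrop, hv, hscan]
        have : i + 1 + tw.length - i = tw.length + 1 := by omega
        rw [this, List.take_succ_cons, hsplit, List.take_left']
        rfl
      rw [hslice]
      have hrec : pvSplitGo xs xs.length (pvScanRun xs xs.length (i + 1)) =
          pvG [] (xs.drop (pvScanRun xs xs.length (i + 1))) := pvGoEq xs _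
      rw [hrec]
      have hdropj : xs.drop (pvScanRun xs xs.length (i + 1)) = dw := by
        rw [hscan, ← List.drop_drop, hsplit, List.drop_left']
        rfl
      rw [hdropj]
      -- left side: pvG [] (drop i) = pvG (v :: tw.reduceOption) dw
      have hrun : pvG [] (xs.drop i) = pvG ([] ++ (some v :: tw).reduceOption) dw := by
        rw [hdrop, hv, hsplit, ← List.cons_append]
        exact pvG_run (some v :: tw) [] dw (by
          simp only [List.all_cons, Bool.and_eq_true]
          exact ⟨rfl, List.all_takeWhile⟩)
      rw [hrun]
      -- dw is [] or starts with none; in both cases pvG (c) dw = c :: pvG [] dw for c ≠ []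
      have hc : (some v :: tw).reduceOption = v :: tw.reduceOption := by
        simp [List.reduceOption_cons_of_some]
      rw [hc]
      match hdwm : dw with
      | [] => simp [pvG]
      | none :: t => simp [pvG]
      | some w :: t =>
        exfalso
        have := List.head?_dropWhile_not (Option.isSome : Option (List Int) → Bool) (xs.drop (i + 1))
        rw [← hdw] at this
        simp at this
    · rw [if_pos (by simp [List.getD, hget]; cases h : (xs[i] : Option (List Int)) with
          | none => rfl
          | some _ => rw [h] at hs; simp at hs)]
      rw [pvGoEq xs (i + 1)]
      rw [hdrop]
      have : xs[i] = none := by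
        cases h : (xs[i] : Option (List Int)) with
        | none => rfl
        | some _ => rw [h] at hs; simp at hs
      rw [this]
      simp [pvG]
  · rw [if_neg hi]
    rw [List.drop_eq_nil_of_le (by omega)]
    simp [pvG]
termination_by xs.length - i
decreasing_by
  · have := pvScanRun_ge xs xs.length (i + 1); omega
  · omega

-- ===== VERDICT (by name: the statement is the Claim_ definition above) =====
theorem split_segments_by_none_py_spec : Claim_equal_split_segments_by_none_py := by
  intro rings3d _
  unfold Spec_split_segments_by_none_py split_segments_by_none_py split_segments_by_none_py_alt
  rw [pvGoEq rings3d 0, List.drop_zero]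
  simpa using pvFoldA rings3d [] []
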